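-- pv_equiv track=rewrite | github.com/lipengyuer/DataScience | src/tasks/hupu/job/gender/2.0/userFeatureExtract_v2.py | specialCharFreq
-- ===== SOURCE A (Python) =====
-- def specialCharFreq(postList):
--     specialMarks = "@#$%"
--     specialMarkSet = set(list(specialMarks))
--     markFreqMap = {}
--     for post in postList:
--         for i in range(len(post)):
--             ngram = post[i]
--             if ngram not in specialMarkSet:
--                 continue
--             if ngram in markFreqMap:
--                 markFreqMap[ngram] += 1
--             else:
--                 markFreqMap[ngram] = 1
--     return markFreqMap
-- ===== SOURCE B (Python) =====
-- def specialCharFreq(postList):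
--     marks = [ch for post in postList for ch in post if ch in "@#$%"]
--     return {ch: marks.count(ch) for ch in dict.fromkeys(marks)}
-- ===== Notes on version B (the rewrite author's own statement) =====
-- stated objective: simpler
-- what changed: Replaces the manual dict-building pass (per-character set membership test plus in-dict branch) with a comprehension collecting the mark occurrences, an ordered dedup via dict.fromkeys, and a per-key list.count.
import Mathlib
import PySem

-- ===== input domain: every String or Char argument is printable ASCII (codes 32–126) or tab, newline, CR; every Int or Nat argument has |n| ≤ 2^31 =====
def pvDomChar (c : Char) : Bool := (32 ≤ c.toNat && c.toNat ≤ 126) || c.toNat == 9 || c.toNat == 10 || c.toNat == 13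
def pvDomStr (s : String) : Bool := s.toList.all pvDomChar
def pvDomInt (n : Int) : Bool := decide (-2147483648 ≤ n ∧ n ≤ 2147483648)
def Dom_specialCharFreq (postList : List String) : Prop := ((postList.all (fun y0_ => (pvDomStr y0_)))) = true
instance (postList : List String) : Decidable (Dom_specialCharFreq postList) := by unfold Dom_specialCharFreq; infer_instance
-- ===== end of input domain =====

-- B replaces A's one-pass manual dict build with: comprehension collecting mark occurrences, ordered dedup, per-key count (simpler; key order preserved).


-- ===== PORT A =====
-- Python's 1-char strings are ported as `String.mk [c]`; post[i] via pyGetD (indices come from range(len(post)), so always in range).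

def specialCharFreq (postList : List String) : List (String × Int) :=
  let specialMarks : String := "@#$%"
  let specialMarkSet : PySem.Set String := PySem.Set.ofList (specialMarks.toList.map (fun c => String.mk [c]))
  let markFreqMap : PySem.Dict String Int :=
    postList.foldl (fun d post =>
      (PySem.List.pyRange 0 (PySem.Str.len post) 1).foldl (fun d i =>
        let ngram := String.mk [PySem.List.pyGetD post.toList i ' ']
        if ¬ (ngram ∈ specialMarkSet) then d
        else if d.contains ngram then d.insert ngram (d.getD ngram 0 + 1)
        else d.insert ngram 1) d)
      PySem.Dict.empty
  markFreqMap.items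

def specialCharFreq_alt (postList : List String) : List (String × Int) :=
  let marks : List String :=
    postList.flatMap (fun post =>
      ((post.toList.map (fun c => String.mk [c])).filter (fun ch => PySem.Str.isIn ch "@#$%")))
  (PySem.List.dedup marks).map (fun ch => (ch, (PySem.List.count marks ch : Int)))


-- ===== PRECONDITION & SPEC =====
def Spec_specialCharFreq (postList : List String) (out : List (String × Int)) : Prop := out = specialCharFreq_alt postList
instance (postList : List String) (out : List (String × Int)) : Decidable (Spec_specialCharFreq postList out) := by unfold Spec_specialCharFreq; infer_instance

-- ===== CLAIM (what is proved, stated in full; the proofs are below) =====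
def Claim_equal_specialCharFreq : Prop := ∀ (postList : List String), Dom_specialCharFreq postList → Spec_specialCharFreq postList (specialCharFreq postList)

-- ===== LEMMAS AND PROOFS =====
def pvMarkSet : PySem.Set String := PySem.Set.ofList ("@#$%".toList.map (fun c => String.mk [c]))
def pvQ (c : Char) : Bool := decide (String.mk [c] ∈ pvMarkSet)
def pvStep (d : PySem.Dict String Int) (c : Char) : PySem.Dict String Int :=
  if ¬ (String.mk [c] ∈ pvMarkSet) then d
  else if d.contains (String.mk [c]) then d.insert (String.mk [c]) (d.getD (String.mk [c]) 0 + 1)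
  else d.insert (String.mk [c]) 1

theorem toList_single (a : Char) : (String.mk [a]).toList = [a] := Eq.symm (String.ofList_eq.mp rfl)

theorem isIn_eq_q (c : Char) : (PySem.Str.isIn (String.mk [c]) "@#$%") = pvQ c := by
  rw [Bool.eq_iff_iff, PySem.Str.isIn_iff_infix]
  simp [pvQ, pvMarkSet, toList_single, List.singleton_infix_iff, PySem.Set.mem_ofList, String.ext_iff]

theorem pvStep_eq (d : PySem.Dict String Int) (c : Char) :
    pvStep d c = if pvQ c then d.insert (String.mk [c]) (d.getD (String.mk [c]) 0 + 1) else d := by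
  unfold pvStep
  by_cases hm : String.mk [c] ∈ pvMarkSet
  · by_cases hc : d.contains (String.mk [c]) = true
    · simp [pvQ, hm, hc]
    · have h0 := PySem.Dict.getD_of_not_contains d (0 : Int) (by simpa using hc)
      simp [pvQ, hm, hc, h0]
  · simp [pvQ, hm]

theorem foldl_step_eq (cs : List Char) (d : PySem.Dict String Int) :
    cs.foldl pvStep d
    = ((cs.filter pvQ).map (fun c => String.mk [c])).foldl
        (fun d k => d.insert k (d.getD k 0 + 1)) d := by
  induction cs generalizing d with
  | nil => rfl
  | cons c cs ih =>
    rw [List.foldl_cons, ih, List.filter_cons]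
    by_cases h : pvQ c = true
    · simp [pvStep_eq, h]
    · simp [pvStep_eq, h]

theorem marks_eq (postList : List String) :
    (postList.flatMap (fun post =>
      ((post.toList.map (fun c => String.mk [c])).filter (fun ch => PySem.Str.isIn ch "@#$%"))))
    = ((postList.flatMap String.toList).filter pvQ).map (fun c => String.mk [c]) := by
  have h : ∀ post : String,
      ((post.toList.map (fun c => String.mk [c])).filter (fun ch => PySem.Str.isIn ch "@#$%"))
      = (post.toList.filter pvQ).map (fun c => String.mk [c]) := by
    intro post
    rw [List.filter_map]
    congr 1
    exact List.filter_congr (fun c _ => isIn_eq_q c)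
  simp only [h, List.filter_flatMap, List.map_flatMap]

theorem AB (postList : List String) : specialCharFreq postList = specialCharFreq_alt postList := by
  simp only [specialCharFreq, specialCharFreq_alt]
  rw [marks_eq]
  have hinner : ∀ (d : PySem.Dict String Int) (post : String),
      (PySem.List.pyRange 0 (PySem.Str.len post) 1).foldl (fun d i =>
        let ngram := String.mk [PySem.List.pyGetD post.toList i ' ']
        if ¬ (ngram ∈ pvMarkSet) then d
        else if d.contains ngram then d.insert ngram (d.getD ngram 0 + 1)
        else d.insert ngram 1) d
      = post.toList.foldl pvStep d := by
    intro d post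
    rw [PySem.Str.len_eq]
    exact PySem.List.foldl_pyRange_zero_pyGetD' post.toList ' ' pvStep d
  have hms : PySem.Set.ofList ("@#$%".toList.map (fun c => String.mk [c])) = pvMarkSet := rfl
  simp only [hms, hinner]
  rw [← List.foldl_flatMap, foldl_step_eq, PySem.Dict.foldl_insert_getD_add_one_eq_counter,
      PySem.Dict.items_counter]
  simp [PySem.List.dedup_eq_ofList, PySem.List.count_eq]

-- ===== VERDICT (by name: the statement is the Claim_ definition above) =====
theorem specialCharFreq_spec : Claim_equal_specialCharFreq := by
  intro postList _
  exact AB postList
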